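-- pv_equiv track=rewrite | github.com/isaacgriggs04/sports-photography | app.py | _normalize_package_deals
-- ===== SOURCE A (Python) =====
-- def _normalize_package_deals(deals):
--     """Return sorted, deduplicated package deals."""
--     best_by_qty = {}
--     for raw in deals or []:
--         try:
--             qty = int(raw.get("quantity", 0))
--             price_cents = int(raw.get("package_price_cents", 0))
--         except (TypeError, ValueError, AttributeError):
--             continue
--         if qty < 2 or price_cents < 50:
--             continue
--         prev = best_by_qty.get(qty)
--         if prev is None or price_cents < prev:
--             best_by_qty[qty] = price_cents
--
--     normalized = [
--         {"quantity": qty, "package_price_cents": cents}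
--         for qty, cents in best_by_qty.items()
--     ]
--     normalized.sort(key=lambda d: (d["quantity"], d["package_price_cents"]))
--     return normalized
-- ===== SOURCE B (Python) =====
-- def _normalize_package_deals(deals):
--     """Return sorted, deduplicated package deals (sort-then-group, no min-tracking dict)."""
--     pairs = []
--     for raw in deals or []:
--         try:
--             qty = int(raw.get("quantity", 0))
--             price_cents = int(raw.get("package_price_cents", 0))
--         except (TypeError, ValueError, AttributeError):
--             continue
--         if qty < 2 or price_cents < 50:
--             continue
--         pairs.append((qty, price_cents))
--     pairs.sort()
--     result = []
--     last_qty = None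
--     for qty, price_cents in pairs:
--         if qty != last_qty:
--             result.append({"quantity": qty, "package_price_cents": price_cents})
--             last_qty = qty
--     return result
-- ===== Notes on version B (the rewrite author's own statement) =====
-- stated objective: alternative
-- what changed: Replaces the min-tracking dict plus final sort with collect-validated-pairs, one lexicographic sort, and a single grouping pass that keeps the first (hence cheapest) entry per quantity.
import Mathlib
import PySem

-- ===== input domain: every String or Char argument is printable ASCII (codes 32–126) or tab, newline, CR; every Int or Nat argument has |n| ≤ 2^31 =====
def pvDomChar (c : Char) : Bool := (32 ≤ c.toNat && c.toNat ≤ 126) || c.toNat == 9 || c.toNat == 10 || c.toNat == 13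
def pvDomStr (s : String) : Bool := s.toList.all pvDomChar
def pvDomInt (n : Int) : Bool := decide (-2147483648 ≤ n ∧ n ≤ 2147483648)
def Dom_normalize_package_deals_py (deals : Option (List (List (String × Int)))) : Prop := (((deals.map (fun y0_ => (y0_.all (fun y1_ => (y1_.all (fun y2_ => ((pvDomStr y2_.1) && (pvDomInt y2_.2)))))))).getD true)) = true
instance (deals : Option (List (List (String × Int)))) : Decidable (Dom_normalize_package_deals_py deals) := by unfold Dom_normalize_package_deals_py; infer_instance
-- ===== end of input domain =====

-- B replaces A's min-tracking dict + final sort by collect-validated-pairs, one lexicographic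
-- sort, and a single grouping pass keeping the first (cheapest) entry per quantity (objective: alternative).


-- ===== PORT A =====
-- literal transliteration of _normalize_package_deals: a best-price dict keyed by quantity,
-- then the items rendered as dicts and sorted by (quantity, package_price_cents).
-- On this input type every dict value is an Int, so int(...) is the identity and the
-- try/except never fires; the sort key d["quantity"] is read with getD (the key is always
-- present in the dicts this function builds, so the default is never used — exact here).
def normalize_package_deals_py (deals : Option (List (List (String × Int)))) : List (List (String × Int)) :=
  let best := (deals.getD []).foldl
    (fun (best : PySem.Dict Int Int) raw =>
      let qty := (PySem.Dict.mk raw).getD "quantity" 0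
      let price_cents := (PySem.Dict.mk raw).getD "package_price_cents" 0
      if qty < 2 ∨ price_cents < 50 then best
      else
        match best.get? qty with
        | none => best.insert qty price_cents
        | some prev => if price_cents < prev then best.insert qty price_cents else best)
    PySem.Dict.empty
  let normalized := best.items.map (fun qc => [("quantity", qc.1), ("package_price_cents", qc.2)])
  PySem.List.sorted2 normalized
    (fun d => (PySem.Dict.mk d).getD "quantity" 0)
    (fun d => (PySem.Dict.mk d).getD "package_price_cents" 0)

-- ===== PORT B =====
-- literal transliteration of Source B: collect validated (qty, price) pairs, sort them
-- lexicographically, then one grouping pass emitting each quantity's first (cheapest) pair.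
def normalize_package_deals_py_alt (deals : Option (List (List (String × Int)))) : List (List (String × Int)) :=
  let pairs := (deals.getD []).foldl
    (fun (acc : List (Int × Int)) raw =>
      let qty := (PySem.Dict.mk raw).getD "quantity" 0
      let price_cents := (PySem.Dict.mk raw).getD "package_price_cents" 0
      if qty < 2 ∨ price_cents < 50 then acc
      else acc ++ [(qty, price_cents)])
    []
  let sortedPairs := PySem.List.sorted2 pairs (fun p => p.1) (fun p => p.2)
  (sortedPairs.foldl
    (fun (st : List (List (String × Int)) × Option Int) p =>
      if st.2 ≠ some p.1 then
        (st.1 ++ [[("quantity", p.1), ("package_price_cents", p.2)]], some p.1)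
      else st)
    ([], none)).1

-- ===== PRECONDITION & SPEC =====
def Spec_normalize_package_deals_py (deals : Option (List (List (String × Int)))) (out : List (List (String × Int))) : Prop := out = normalize_package_deals_py_alt deals
instance (deals : Option (List (List (String × Int)))) (out : List (List (String × Int))) : Decidable (Spec_normalize_package_deals_py deals out) := by unfold Spec_normalize_package_deals_py; infer_instance

-- ===== CLAIM (what is proved, stated in full; the proofs are below) =====
def Claim_equal_normalize_package_deals_py : Prop := ∀ (deals : Option (List (List (String × Int)))), Dom_normalize_package_deals_py deals → Spec_normalize_package_deals_py deals (normalize_package_deals_py deals)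

-- ===== LEMMAS AND PROOFS =====

-- the (qty, price) pair a raw dict yields
def pvPair (raw : List (String × Int)) : Int × Int :=
  ((PySem.Dict.mk raw).getD "quantity" 0, (PySem.Dict.mk raw).getD "package_price_cents" 0)

def pvOk (raw : List (String × Int)) : Bool :=
  !(decide ((pvPair raw).1 < 2) || decide ((pvPair raw).2 < 50))

-- the validated pairs of a raw list
def pvP (l : List (List (String × Int))) : List (Int × Int) := (l.filter pvOk).map pvPair

def pvToDict (p : Int × Int) : List (String × Int) :=
  [("quantity", p.1), ("package_price_cents", p.2)]

-- A's dict update for one validated pair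
def pvUpd (d : PySem.Dict Int Int) (p : Int × Int) : PySem.Dict Int Int :=
  match d.get? p.1 with
  | none => d.insert p.1 p.2
  | some prev => if p.2 < prev then d.insert p.1 p.2 else d

def pvOmin (o : Option Int) (x : Int) : Option Int :=
  some (match o with | none => x | some v => min v x)

-- running minimum of the prices of pairs with first component q
def pvMinFrom (o : Option Int) (P : List (Int × Int)) (q : Int) : Option Int :=
  ((P.filter (fun a => a.1 == q)).map Prod.snd).foldl pvOmin o

-- first-occurrence-per-quantity extraction
def pvFirsts : List (Int × Int) → List (Int × Int)
  | [] => []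
  | p :: t => p :: pvFirsts (t.filter (fun a => !(a.1 == p.1)))
termination_by l => l.length
decreasing_by simpa using le_trans (List.length_filter_le _ _) (le_of_eq (List.length_attach ..))

-- B's grouping loop, recursively
def pvGrp (last : Option Int) : List (Int × Int) → List (List (String × Int))
  | [] => []
  | p :: t => if last = some p.1 then pvGrp last t else pvToDict p :: pvGrp (some p.1) t

def pvLexLe (a b : Int × Int) : Prop := a.1 < b.1 ∨ (a.1 = b.1 ∧ a.2 ≤ b.2)

-- the two sort keys A uses
def pvKQ (d : List (String × Int)) : Int := (PySem.Dict.mk d).getD "quantity" 0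
def pvKC (d : List (String × Int)) : Int := (PySem.Dict.mk d).getD "package_price_cents" 0

lemma pvKQ_toDict (p : Int × Int) : pvKQ (pvToDict p) = p.1 := by
  simp [pvKQ, pvToDict, PySem.Dict.getD, PySem.Dict.get?_mk_cons]

-- B's pair-collecting loop is filter-then-map
lemma pvPairs_eq (l : List (List (String × Int))) (acc : List (Int × Int)) :
    l.foldl
      (fun (acc : List (Int × Int)) raw =>
        let qty := (PySem.Dict.mk raw).getD "quantity" 0
        let price_cents := (PySem.Dict.mk raw).getD "package_price_cents" 0
        if qty < 2 ∨ price_cents < 50 then acc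
        else acc ++ [(qty, price_cents)]) acc = acc ++ pvP l := by
  induction l generalizing acc with
  | nil => simp [pvP]
  | cons raw t ih =>
      simp only [List.foldl_cons]
      by_cases h : (PySem.Dict.mk raw).getD "quantity" 0 < 2 ∨ (PySem.Dict.mk raw).getD "package_price_cents" 0 < 50
      · rw [if_pos h, ih]
        have hok : pvOk raw = false := by
          simp only [pvOk, pvPair]
          rcases h with h | h <;> simp [h]
        simp [pvP, hok]
      · rw [if_neg h, ih]
        have hok : pvOk raw = true := by
          push Not at h
          simp only [pvOk, pvPair]
          simp [not_lt.mpr h.1, not_lt.mpr h.2]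
        simp [pvP, hok, pvPair]

-- A's dict loop is the pvUpd fold over the validated pairs
lemma pvFold_eq (l : List (List (String × Int))) (d : PySem.Dict Int Int) :
    l.foldl
      (fun (best : PySem.Dict Int Int) raw =>
        let qty := (PySem.Dict.mk raw).getD "quantity" 0
        let price_cents := (PySem.Dict.mk raw).getD "package_price_cents" 0
        if qty < 2 ∨ price_cents < 50 then best
        else
          match best.get? qty with
          | none => best.insert qty price_cents
          | some prev => if price_cents < prev then best.insert qty price_cents else best) d
      = (pvP l).foldl pvUpd d := by
  induction l generalizing d with
  | nil => simp [pvP]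
  | cons raw t ih =>
      simp only [List.foldl_cons]
      by_cases h : (PySem.Dict.mk raw).getD "quantity" 0 < 2 ∨ (PySem.Dict.mk raw).getD "package_price_cents" 0 < 50
      · rw [if_pos h, ih]
        have hok : pvOk raw = false := by
          simp only [pvOk, pvPair]
          rcases h with h | h <;> simp [h]
        simp [pvP, hok]
      · rw [if_neg h, ih]
        have hok : pvOk raw = true := by
          push Not at h
          simp only [pvOk, pvPair]
          simp [not_lt.mpr h.1, not_lt.mpr h.2]
        simp only [pvP, List.filter_cons, hok, List.map_cons, List.foldl_cons]
        rfl

lemma pvGet_pvUpd (d : PySem.Dict Int Int) (p : Int × Int) (q : Int) :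
    (pvUpd d p).get? q = if q = p.1 then pvOmin (d.get? p.1) p.2 else d.get? q := by
  unfold pvUpd
  rcases hd : d.get? p.1 with _ | prev
  · simp [PySem.Dict.get?_insert, pvOmin, hd]
  · show (if p.2 < prev then d.insert p.1 p.2 else d).get? q =
      if q = p.1 then pvOmin (some prev) p.2 else d.get? q
    split_ifs with hlt hq hq
    · subst hq; simp [PySem.Dict.get?_insert, pvOmin]; omega
    · simp [PySem.Dict.get?_insert, hq]
    · subst hq; rw [hd]; simp [pvOmin]; omega
    · rfl

lemma pvNodupKeys_pvUpd (d : PySem.Dict Int Int) (p : Int × Int) (h : d.keys.Nodup) :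
    (pvUpd d p).keys.Nodup := by
  unfold pvUpd
  rcases hd : d.get? p.1 with _ | prev
  · exact PySem.Dict.nodup_keys_insert _ _ _ h
  · show (if p.2 < prev then d.insert p.1 p.2 else d).keys.Nodup
    split_ifs with hlt
    · exact PySem.Dict.nodup_keys_insert _ _ _ h
    · exact h

lemma pvNodupKeys_foldl (P : List (Int × Int)) (d : PySem.Dict Int Int) (h : d.keys.Nodup) :
    (P.foldl pvUpd d).keys.Nodup := by
  induction P generalizing d with
  | nil => exact h
  | cons p t ih => exact ih _ (pvNodupKeys_pvUpd d p h)

lemma pvMinFrom_cons_eq (o : Option Int) (p : Int × Int) (t : List (Int × Int)) (q : Int) (h : p.1 = q) :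
    pvMinFrom o (p :: t) q = pvMinFrom (pvOmin o p.2) t q := by
  simp [pvMinFrom, List.filter_cons, h]

lemma pvMinFrom_cons_ne (o : Option Int) (p : Int × Int) (t : List (Int × Int)) (q : Int) (h : p.1 ≠ q) :
    pvMinFrom o (p :: t) q = pvMinFrom o t q := by
  simp [pvMinFrom, List.filter_cons, h]

lemma pvGet_foldl_pvUpd (P : List (Int × Int)) (d : PySem.Dict Int Int) (q : Int) :
    (P.foldl pvUpd d).get? q = pvMinFrom (d.get? q) P q := by
  induction P generalizing d with
  | nil => simp [pvMinFrom]
  | cons p t ih =>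
      simp only [List.foldl_cons]
      rw [ih]
      by_cases h : p.1 = q
      · rw [pvMinFrom_cons_eq _ _ _ _ h, pvGet_pvUpd]
        rw [if_pos h.symm, h]
      · rw [pvMinFrom_cons_ne _ _ _ _ h, pvGet_pvUpd, if_neg (fun hq => h hq.symm)]

-- folding pvOmin from a value below everything keeps it
lemma pvFoldl_pvOmin_of_le (xs : List Int) (v : Int) (h : ∀ x ∈ xs, v ≤ x) :
    xs.foldl pvOmin (some v) = some v := by
  induction xs with
  | nil => rfl
  | cons x t ih =>
      have hx : v ≤ x := h x (by simp)
      have hm : pvOmin (some v) x = some v := by simp [pvOmin]; omega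
      rw [List.foldl_cons, hm]
      exact ih (fun y hy => h y (by simp [hy]))

-- insertion preserves a total-preorder pairwise invariant
lemma pvInsertBy_pairwise {α : Type} (before : α → α → Bool) (R : α → α → Prop)
    (htot : ∀ a b, before a b = true → R a b) (hneg : ∀ a b, before a b = false → R b a)
    (htr : ∀ a b c, R a b → R b c → R a c) (x : α) (ys : List α) (h : ys.Pairwise R) :
    (PySem.List.insertBy before x ys).Pairwise R := by
  induction ys with
  | nil => simp [PySem.List.insertBy]
  | cons y t ih =>
      rcases List.pairwise_cons.mp h with ⟨hy, ht⟩
      by_cases hb : before x y = true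
      · rw [PySem.List.insertBy, if_pos hb]
        refine List.pairwise_cons.mpr ⟨?_, h⟩
        intro z hz
        rcases List.mem_cons.mp hz with rfl | hz
        · exact htot _ _ hb
        · exact htr _ _ _ (htot _ _ hb) (hy z hz)
      · rw [PySem.List.insertBy, if_neg hb]
        refine List.pairwise_cons.mpr ⟨?_, ih ht⟩
        intro z hz
        rcases (PySem.List.mem_insertBy before x z t).mp hz with rfl | hz
        · exact hneg _ _ (Bool.eq_false_iff.mpr hb)
        · exact hy z hz

lemma pvFoldl_insertBy_pairwise {α : Type} (before : α → α → Bool) (R : α → α → Prop)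
    (htot : ∀ a b, before a b = true → R a b) (hneg : ∀ a b, before a b = false → R b a)
    (htr : ∀ a b c, R a b → R b c → R a c) (xs acc : List α) (h : acc.Pairwise R) :
    (xs.foldl (fun acc x => PySem.List.insertBy before x acc) acc).Pairwise R := by
  induction xs generalizing acc with
  | nil => exact h
  | cons x t ih => exact ih _ (pvInsertBy_pairwise before R htot hneg htr x acc h)

lemma pvSorted2_pairs_pairwise (P : List (Int × Int)) :
    (PySem.List.sorted2 P (fun p => p.1) (fun p => p.2)).Pairwise pvLexLe := by
  have hdef : PySem.List.sorted2 P (fun p => p.1) (fun p => p.2) =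
      P.foldl (fun acc x => PySem.List.insertBy
        (fun a b => decide (a.1 < b.1) || (!decide (b.1 < a.1) && decide (a.2 < b.2))) x acc) [] := rfl
  rw [hdef]
  apply pvFoldl_insertBy_pairwise
  · intro a b h
    unfold pvLexLe
    by_cases h1 : a.1 < b.1
    · omega
    · by_cases h2 : b.1 < a.1
      · simp [h1, h2] at h
      · by_cases h3 : a.2 < b.2
        · omega
        · simp [h1, h2, h3] at h
  · intro a b h
    unfold pvLexLe
    by_cases h1 : a.1 < b.1
    · simp [h1] at h
    · by_cases h2 : b.1 < a.1
      · omega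
      · by_cases h3 : a.2 < b.2
        · simp [h1, h2, h3] at h
        · omega
  · intro a b c hab hbc
    unfold pvLexLe at *; omega
  · exact List.Pairwise.nil

lemma pvSorted2_dicts_pairwise (xs : List (List (String × Int))) :
    (PySem.List.sorted2 xs pvKQ pvKC).Pairwise (fun a b => pvKQ a ≤ pvKQ b) := by
  have hdef : PySem.List.sorted2 xs pvKQ pvKC =
      xs.foldl (fun acc x => PySem.List.insertBy
        (fun a b => decide (pvKQ a < pvKQ b) || (!decide (pvKQ b < pvKQ a) && decide (pvKC a < pvKC b))) x acc) [] := rfl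
  rw [hdef]
  apply pvFoldl_insertBy_pairwise
  · intro a b h
    by_cases h1 : pvKQ a < pvKQ b
    · omega
    · by_cases h2 : pvKQ b < pvKQ a
      · simp [h1, h2] at h
      · omega
  · intro a b h
    by_cases h1 : pvKQ a < pvKQ b
    · simp [h1] at h
    · omega
  · intro a b c hab hbc
    omega
  · exact List.Pairwise.nil

lemma pvGrp_foldl (S : List (Int × Int)) (acc : List (List (String × Int))) (last : Option Int) :
    (S.foldl
      (fun (st : List (List (String × Int)) × Option Int) p =>
        if st.2 ≠ some p.1 then
          (st.1 ++ [[("quantity", p.1), ("package_price_cents", p.2)]], some p.1)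
        else st)
      (acc, last)).1 = acc ++ pvGrp last S := by
  induction S generalizing acc last with
  | nil => simp [pvGrp]
  | cons p t ih =>
      simp only [List.foldl_cons]
      by_cases h : last = some p.1
      · rw [if_neg (by simp [h]), pvGrp, if_pos h, ih]
      · rw [if_pos (by simp [h]), pvGrp, if_neg h, ih]
        simp [pvToDict]

lemma pvGrp_skip (t : List (Int × Int)) (q : Int)
    (hs : t.Pairwise (fun a b => a.1 ≤ b.1)) (hge : ∀ a ∈ t, q ≤ a.1) :
    pvGrp (some q) t = pvGrp none (t.filter (fun a => !(a.1 == q))) := by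
  induction t with
  | nil => rfl
  | cons a t ih =>
      rcases List.pairwise_cons.mp hs with ⟨ha, ht⟩
      by_cases h : a.1 = q
      · rw [pvGrp, if_pos (by rw [h]), List.filter_cons, if_neg (by simp [h])]
        exact ih ht (fun b hb => hge b (by simp [hb]))
      · have hq : q < a.1 := lt_of_le_of_ne (hge a (by simp)) (fun he => h he.symm)
        rw [pvGrp, if_neg (by simp; omega), List.filter_cons, if_pos (by simp [h]), pvGrp,
          if_neg (by simp)]
        congr 1
        have hft : t.filter (fun a => !(a.1 == q)) = t := by
          apply List.filter_eq_self.mpr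
          intro b hb
          have := ha b hb
          simp; omega
        rw [hft]

lemma pvMem_pvFirsts {a : Int × Int} : ∀ {S : List (Int × Int)}, a ∈ pvFirsts S → a ∈ S := by
  intro S
  induction S using pvFirsts.induct with
  | case1 => simp [pvFirsts]
  | case2 p t ih =>
      rw [List.unattach_filter (hf := fun x h => rfl), List.unattach_attach] at ih
      rw [pvFirsts]
      intro h
      rcases List.mem_cons.mp h with rfl | h
      · simp
      · exact List.mem_cons_of_mem _ (List.mem_of_mem_filter (ih h))

lemma pvGrp_eq_pvFirsts (S : List (Int × Int)) (hs : S.Pairwise (fun a b => a.1 ≤ b.1)) :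
    pvGrp none S = (pvFirsts S).map pvToDict := by
  induction S using pvFirsts.induct with
  | case1 => simp [pvGrp, pvFirsts]
  | case2 p t ih =>
      rw [List.unattach_filter (hf := fun x h => rfl), List.unattach_attach] at ih
      rcases List.pairwise_cons.mp hs with ⟨hp, ht⟩
      rw [pvGrp, if_neg (by simp), pvFirsts, List.map_cons]
      congr 1
      rw [pvGrp_skip t p.1 ht (fun a ha => hp a ha)]
      exact ih (ht.sublist List.filter_sublist)

lemma pvFirsts_pairwise_lt (S : List (Int × Int)) (hs : S.Pairwise (fun a b => a.1 ≤ b.1)) :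
    (pvFirsts S).Pairwise (fun a b => a.1 < b.1) := by
  induction S using pvFirsts.induct with
  | case1 => simp [pvFirsts]
  | case2 p t ih =>
      rw [List.unattach_filter (hf := fun x h => rfl), List.unattach_attach] at ih
      rcases List.pairwise_cons.mp hs with ⟨hp, ht⟩
      rw [pvFirsts]
      refine List.pairwise_cons.mpr ⟨?_, ih (ht.sublist List.filter_sublist)⟩
      intro b hb
      have hbm := pvMem_pvFirsts hb
      have hb1 : (!(b.1 == p.1)) = true := (List.mem_filter.mp hbm).2
      have hle : p.1 ≤ b.1 := hp b (List.mem_filter.mp hbm).1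
      simp at hb1
      omega

lemma pvMinFrom_filter_ne (t : List (Int × Int)) (q r : Int) (h : r ≠ q) :
    pvMinFrom none (t.filter (fun a => !(a.1 == r))) q = pvMinFrom none t q := by
  unfold pvMinFrom
  rw [List.filter_filter]
  congr 1
  apply congrArg
  apply List.filter_congr
  intro a _
  by_cases hq : a.1 = q <;> simp [hq]
  omega

lemma pvMem_pvFirsts_iff (S : List (Int × Int)) (hs : S.Pairwise pvLexLe) (q c : Int) :
    (q, c) ∈ pvFirsts S ↔ pvMinFrom none S q = some c := by
  induction S using pvFirsts.induct with
  | case1 => simp [pvFirsts, pvMinFrom]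
  | case2 p t ih =>
      rw [List.unattach_filter (hf := fun x h => rfl), List.unattach_attach] at ih
      rcases List.pairwise_cons.mp hs with ⟨hp, ht⟩
      rw [pvFirsts]
      by_cases h : p.1 = q
      · -- head owns q; its price is minimal by sortedness
        have hmin : pvMinFrom none (p :: t) q = some p.2 := by
          rw [pvMinFrom_cons_eq _ _ _ _ h]
          have ho : pvOmin none p.2 = some p.2 := rfl
          rw [ho]
          unfold pvMinFrom
          apply pvFoldl_pvOmin_of_le
          intro x hx
          rcases List.mem_map.mp hx with ⟨a, ha, rfl⟩
          have haf : (a.1 == q) = true := (List.mem_filter.mp ha).2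
          have ham := (List.mem_filter.mp ha).1
          have hlx := hp a ham
          unfold pvLexLe at hlx
          simp at haf
          omega
        rw [hmin]
        constructor
        · intro hm
          rcases List.mem_cons.mp hm with he | hm
          · rw [← he]
          · exfalso
            have hmf := (List.mem_filter.mp (pvMem_pvFirsts hm)).2
            simp [h] at hmf
        · intro hc
          have hpc : (q, c) = p := by
            obtain ⟨a, b⟩ := p
            simp_all
          rw [hpc]
          exact List.mem_cons_self
      · rw [pvMinFrom_cons_ne _ _ _ _ h, ← pvMinFrom_filter_ne t q p.1 h]
        have ih' := ih (ht.sublist List.filter_sublist)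
        constructor
        · intro hm
          rcases List.mem_cons.mp hm with he | hm
          · exfalso; apply h; rw [← he]
          · exact ih'.mp hm
        · intro hm
          exact List.mem_cons_of_mem _ (ih'.mpr hm)

lemma pvMinFrom_perm (S P : List (Int × Int)) (hp : S.Perm P) (q : Int) :
    pvMinFrom none S q = pvMinFrom none P q := by
  unfold pvMinFrom
  haveI : RightCommutative pvOmin := ⟨by
    intro b a₁ a₂
    rcases b with _ | v <;> simp [pvOmin] <;> omega⟩
  exact List.Perm.foldl_eq ((hp.filter _).map _) none

lemma pvPairwise_lt_of_le_nodup (l : List (List (String × Int)))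
    (hle : l.Pairwise (fun a b => pvKQ a ≤ pvKQ b)) (hnd : (l.map pvKQ).Nodup) :
    l.Pairwise (fun a b => pvKQ a < pvKQ b) := by
  have hne : l.Pairwise (fun a b => pvKQ a ≠ pvKQ b) := List.pairwise_map.mp hnd
  exact (hle.and hne).imp (fun h => lt_of_le_of_ne h.1 h.2)

theorem normalize_package_deals_py_spec : Claim_equal_normalize_package_deals_py := by
  intro deals _
  unfold Spec_normalize_package_deals_py
  unfold normalize_package_deals_py normalize_package_deals_py_alt
  set l := deals.getD [] with hl
  -- B side
  rw [pvPairs_eq l []]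
  simp only [List.nil_append]
  set S := PySem.List.sorted2 (pvP l) (fun p => p.1) (fun p => p.2) with hS
  have hSlex : S.Pairwise pvLexLe := pvSorted2_pairs_pairwise (pvP l)
  have hSle : S.Pairwise (fun a b => a.1 ≤ b.1) := by
    refine hSlex.imp fun h => ?_
    unfold pvLexLe at h; omega
  rw [pvGrp_foldl S [] none]
  simp only [List.nil_append]
  rw [pvGrp_eq_pvFirsts S hSle]
  -- A side
  rw [pvFold_eq l PySem.Dict.empty]
  set D := ((pvP l).foldl pvUpd PySem.Dict.empty) with hD
  have hDnd : D.keys.Nodup := pvNodupKeys_foldl _ _ PySem.Dict.nodup_keys_empty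
  have hDget : ∀ q, D.get? q = pvMinFrom none (pvP l) q := by
    intro q
    rw [hD, pvGet_foldl_pvUpd, PySem.Dict.get?_empty]
  have hmapfun : (fun (qc : Int × Int) => [("quantity", qc.1), ("package_price_cents", qc.2)]) = pvToDict := rfl
  rw [hmapfun]
  show PySem.List.sorted2 (D.items.map pvToDict) pvKQ pvKC = (pvFirsts S).map pvToDict
  have hSP : S.Perm (pvP l) := PySem.List.sorted2_perm _ _ _ _
  have hFnd : (pvFirsts S).Nodup := by
    have hpw : (pvFirsts S).Pairwise (fun a b => a ≠ b) := by
      refine (pvFirsts_pairwise_lt S hSle).imp fun h => ?_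
      intro he; rw [he] at h; omega
    exact hpw
  have hInd : D.items.Nodup := List.Nodup.of_map Prod.fst hDnd
  have hmem : ∀ a : Int × Int, a ∈ pvFirsts S ↔ a ∈ D.items := by
    rintro ⟨q, c⟩
    rw [pvMem_pvFirsts_iff S hSlex q c, pvMinFrom_perm S (pvP l) hSP q, ← hDget q]
    exact PySem.Dict.get?_eq_some_iff_mem_items D q c hDnd
  have hperm : (pvFirsts S).Perm D.items :=
    (List.perm_ext_iff_of_nodup hFnd hInd).mpr hmem
  have hpermD : (PySem.List.sorted2 (D.items.map pvToDict) pvKQ pvKC).Perm ((pvFirsts S).map pvToDict) :=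
    (PySem.List.sorted2_perm _ _ _ _).trans (hperm.map pvToDict).symm
  have hsortA : (PySem.List.sorted2 (D.items.map pvToDict) pvKQ pvKC).Pairwise (fun a b => pvKQ a < pvKQ b) := by
    apply pvPairwise_lt_of_le_nodup _ (pvSorted2_dicts_pairwise _)
    have h1 : ((PySem.List.sorted2 (D.items.map pvToDict) pvKQ pvKC).map pvKQ).Perm
        (((pvFirsts S).map pvToDict).map pvKQ) := hpermD.map pvKQ
    rw [List.Perm.nodup_iff h1, List.map_map]
    have hcomp : (pvKQ ∘ pvToDict) = Prod.fst := by
      funext p; exact pvKQ_toDict p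
    rw [hcomp]
    have hpw : ((pvFirsts S).map Prod.fst).Pairwise (fun a b => a ≠ b) := by
      refine List.pairwise_map.mpr ((pvFirsts_pairwise_lt S hSle).imp fun h => ?_)
      omega
    exact hpw
  have hsortF : ((pvFirsts S).map pvToDict).Pairwise (fun a b => pvKQ a < pvKQ b) := by
    apply List.pairwise_map.mpr
    refine (pvFirsts_pairwise_lt S hSle).imp ?_
    intro a b h
    rw [pvKQ_toDict, pvKQ_toDict]; exact h
  exact List.eq_of_perm_of_sorted
    (fun a b _ _ h1 h2 => absurd h2 (by omega)) hsortA hsortF hpermD
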